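-- pv_equiv track=rewrite | github.com/just-buildsystem/justbuild | bin/just-import-git.py | name_imports
-- ===== SOURCE A (Python) =====
-- from typing import Any, Dict, List, NoReturn, Optional, Set, Tuple, cast
--
-- def name_imports(to_import: List[str],
--                  extra_imports: List[str],
--                  existing: Set[str],
--                  base_name: str,
--                  main: Optional[str] = None) -> Dict[str, str]:
--     """Assign names to the repositories to import in such a way that
--     no conflicts arise."""
--     assign: Dict[str, str] = {}
--
--     def find_name(name: str) -> str:
--         base: str = "%s/%s" % (base_name, name)
--         if (base not in existing) and (base not in assign):
--             return base
--         count: int = 0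
--         while True:
--             count += 1
--             candidate: str = base + " (%d)" % count
--             if (candidate not in existing) and (candidate not in assign):
--                 return candidate
--
--     if main is not None and (base_name not in existing):
--         assign[main] = base_name
--         to_import = [x for x in to_import if x != main]
--         extra_imports = [x for x in extra_imports if x != main]
--     for repo in to_import + extra_imports:
--         assign[repo] = find_name(repo)
--     return assign
-- ===== SOURCE B (Python) =====
-- from typing import Dict, List, Optional, Set
--
--
-- def name_imports(to_import: List[str],
--                  extra_imports: List[str],
--                  existing: Set[str],
--                  base_name: str,
--                  main: Optional[str] = None) -> Dict[str, str]:
--     """Assign conflict-free names to the repositories to import.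
--
--     Inverted approach: instead of generating candidate names and testing
--     each against all blocking names, every blocking name is parsed ONCE,
--     when it starts blocking, into a global index: the set of blocked
--     names plus, for each way it reads as base + " (" + mid + ")", a
--     bucket mapping that base to the taken suffix string mid.  A name is
--     then chosen by one set lookup and by probing the smallest suffix
--     count absent from the base's (small) bucket.
--     """
--     assign: Dict[str, str] = {}
--     blocked: Set[str] = set()
--     buckets: Dict[str, Set[str]] = {}
--
--     def register(s: str) -> None:
--         blocked.add(s)
--         if s.endswith(")"):
--             i = s.find(" (")
--             while i != -1:
--                 buckets.setdefault(s[:i], set()).add(s[i + 2:-1])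
--                 i = s.find(" (", i + 1)
--
--     for s in existing:
--         register(s)
--     if main is not None and base_name not in existing:
--         assign[main] = base_name
--         to_import = [x for x in to_import if x != main]
--         extra_imports = [x for x in extra_imports if x != main]
--         register(main)
--     for repo in to_import + extra_imports:
--         base = "%s/%s" % (base_name, repo)
--         if base not in blocked:
--             name = base
--         else:
--             taken = buckets.get(base, ())
--             k = 1
--             while "%d" % k in taken:
--                 k += 1
--             name = base + " (%d)" % k
--         assign[repo] = name
--         register(repo)  # repo is now a key of assign, so it blocks
--     return assign
-- ===== Notes on version B (the rewrite author's own statement) =====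
-- stated objective: alternative
-- what changed: Inverts A's generate-and-test search: instead of formatting candidate names and testing each against all blocking names, B parses the blocking names once per base into a per-base table (bare-name-taken flag plus the set of taken ' (%d)' suffix strings), maintains the tables incrementally as assigned keys start blocking, and picks the smallest untaken suffix from the table.
import Mathlib
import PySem

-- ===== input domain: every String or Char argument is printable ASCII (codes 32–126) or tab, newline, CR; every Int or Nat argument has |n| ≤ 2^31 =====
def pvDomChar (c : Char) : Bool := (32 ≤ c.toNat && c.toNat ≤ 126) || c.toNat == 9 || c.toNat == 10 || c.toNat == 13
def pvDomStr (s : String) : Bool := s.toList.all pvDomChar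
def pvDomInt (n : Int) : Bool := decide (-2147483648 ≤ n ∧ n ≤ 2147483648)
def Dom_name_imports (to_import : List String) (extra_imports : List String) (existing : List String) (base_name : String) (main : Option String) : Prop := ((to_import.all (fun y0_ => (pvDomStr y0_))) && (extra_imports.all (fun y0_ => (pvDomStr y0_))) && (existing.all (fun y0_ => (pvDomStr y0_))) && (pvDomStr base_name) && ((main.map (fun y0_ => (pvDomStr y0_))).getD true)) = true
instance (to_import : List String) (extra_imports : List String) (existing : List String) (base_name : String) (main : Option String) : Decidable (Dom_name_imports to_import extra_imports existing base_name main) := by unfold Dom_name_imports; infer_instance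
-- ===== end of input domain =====

-- B inverts A's generate-and-test search: every blocking name is parsed once into a global
-- index (blocked-name set + per-base buckets of taken " (%d)" suffix strings) and names are
-- chosen by one set lookup plus a probe of the small per-base bucket; equal return values
-- are proved for all inputs.

-- ===== PORT A =====

-- "base (%d)" % count
def pvA_cand (base : String) (count : Nat) : String :=
  base ++ " (" ++ PySem.Int.toStr (count : Int) ++ ")"

-- the 'while True' of find_name; Python's count starts at 0 and is incremented to 1 before
-- first use, so the port starts at 1.  fuel only makes the loop structurally terminating;
-- the fuel passed at the call site is proved sufficient below, so the 0 branch is unreachable.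
def pvA_findLoop (existing : List String) (assign : PySem.Dict String String)
    (base : String) (count : Nat) : Nat → String
  | 0 => ""
  | fuel + 1 =>
    let candidate := pvA_cand base count
    if !(existing.contains candidate) && !(assign.contains candidate) then candidate
    else pvA_findLoop existing assign base (count + 1) fuel

-- find_name
def pvA_findName (existing : List String) (assign : PySem.Dict String String)
    (base_name name : String) : String :=
  let base := base_name ++ "/" ++ name
  if !(existing.contains base) && !(assign.contains base) then base
  else pvA_findLoop existing assign base 1 (existing.length + assign.size + 1)

-- the 'for repo in to_import + extra_imports' loop
def pvA_loop (existing : List String) (base_name : String) (repos : List String)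
    (assign : PySem.Dict String String) : PySem.Dict String String :=
  repos.foldl (fun a repo => a.insert repo (pvA_findName existing a base_name repo)) assign

-- the 'if main is not None and base_name not in existing' prelude
def pvA_init (to_import : List String) (extra_imports : List String)
    (existing : List String) (base_name : String) (main : Option String) :
    PySem.Dict String String × List String × List String :=
  match main with
  | some m =>
    if !(existing.contains base_name) then
      (PySem.Dict.empty.insert m base_name,
       to_import.filter (fun x => x != m), extra_imports.filter (fun x => x != m))
    else (PySem.Dict.empty, to_import, extra_imports)
  | none => (PySem.Dict.empty, to_import, extra_imports)

def name_imports (to_import : List String) (extra_imports : List String) (existing : List String) (base_name : String) (main : Option String) : List (String × String) :=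
  let st := pvA_init to_import extra_imports existing base_name main
  (pvA_loop existing base_name (st.2.1 ++ st.2.2) st.1).items

-- ===== PORT B =====

-- the 'while i != -1' loop of register: walk the occurrences of " (" in s, recording for
-- each decomposition s = s[:i] + " (" + s[i+2:-1] + ")" the taken suffix in that base's
-- bucket.  fuel only makes the loop structurally terminating; the fuel passed at the call
-- site is proved sufficient below.
def pvB_regLoop (s : String) : Int → PySem.Dict String (PySem.Set String) → Nat →
    PySem.Dict String (PySem.Set String)
  | _, buckets, 0 => buckets
  | i, buckets, fuel + 1 =>
    if i == -1 then buckets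
    else
      pvB_regLoop s (PySem.Str.findFrom s " (" (i + 1))
        (buckets.insert (PySem.Str.slice s none (some i))
          (PySem.Set.add
            ((buckets.getD (PySem.Str.slice s none (some i)) PySem.Set.empty))
            (PySem.Str.slice s (some (i + 2)) (some (-1)))))
        fuel

-- register(s): s joins the blocked set and its decompositions join the buckets
def pvB_register (s : String) (blocked : PySem.Set String)
    (buckets : PySem.Dict String (PySem.Set String)) :
    PySem.Set String × PySem.Dict String (PySem.Set String) :=
  (PySem.Set.add blocked s,
   if PySem.Str.endswith s ")" then
     pvB_regLoop s (PySem.Str.find s " (") buckets (s.toList.length + 2)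
   else buckets)

-- 'k = 1; while "%d" % k in taken: k += 1'; fuel only for structural termination,
-- the fuel passed at the call site is proved sufficient below.
def pvB_mex (taken : PySem.Set String) (k : Nat) : Nat → Nat
  | 0 => k
  | fuel + 1 =>
    if PySem.Set.contains taken (PySem.Int.toStr (k : Int)) then pvB_mex taken (k + 1) fuel
    else k

-- one iteration of B's loop over the state (assign, blocked, buckets)
def pvB_step (base_name : String)
    (st : PySem.Dict String String × PySem.Set String × PySem.Dict String (PySem.Set String))
    (repo : String) :
    PySem.Dict String String × PySem.Set String × PySem.Dict String (PySem.Set String) :=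
  let base := base_name ++ "/" ++ repo
  let name :=
    if !(PySem.Set.contains st.2.1 base) then base
    else
      let taken := st.2.2.getD base PySem.Set.empty
      base ++ " (" ++ PySem.Int.toStr ((pvB_mex taken 1 (taken.length + 1) : Nat) : Int) ++ ")"
  let r := pvB_register repo st.2.1 st.2.2
  (st.1.insert repo name, r.1, r.2)

-- 'for s in existing: register(s)' (building sets/buckets only: order-independent) plus
-- the 'main' prelude (shared verbatim with A's Python)
def pvB_init (to_import : List String) (extra_imports : List String)
    (existing : List String) (base_name : String) (main : Option String) :
    (PySem.Dict String String × PySem.Set String × PySem.Dict String (PySem.Set String)) ×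
      List String × List String :=
  let st0 := existing.foldl (fun bb s => pvB_register s bb.1 bb.2)
    (PySem.Set.empty, PySem.Dict.empty)
  match main with
  | some m =>
    if !(existing.contains base_name) then
      let st1 := pvB_register m st0.1 st0.2
      ((PySem.Dict.empty.insert m base_name, st1.1, st1.2),
       to_import.filter (fun x => x != m), extra_imports.filter (fun x => x != m))
    else ((PySem.Dict.empty, st0.1, st0.2), to_import, extra_imports)
  | none => ((PySem.Dict.empty, st0.1, st0.2), to_import, extra_imports)

def name_imports_alt (to_import : List String) (extra_imports : List String) (existing : List String) (base_name : String) (main : Option String) : List (String × String) :=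
  let st := pvB_init to_import extra_imports existing base_name main
  (((st.2.1 ++ st.2.2).foldl (pvB_step base_name) st.1).1).items

-- ===== PRECONDITION & SPEC =====
def Spec_name_imports (to_import : List String) (extra_imports : List String) (existing : List String) (base_name : String) (main : Option String) (out : List (String × String)) : Prop := out = name_imports_alt to_import extra_imports existing base_name main
instance (to_import : List String) (extra_imports : List String) (existing : List String) (base_name : String) (main : Option String) (out : List (String × String)) : Decidable (Spec_name_imports to_import extra_imports existing base_name main out) := by unfold Spec_name_imports; infer_instance

-- ===== CLAIM (what is proved, stated in full; the proofs are below) =====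
def Claim_equal_name_imports : Prop := ∀ (to_import : List String) (extra_imports : List String) (existing : List String) (base_name : String) (main : Option String), Dom_name_imports to_import extra_imports existing base_name main → Spec_name_imports to_import extra_imports existing base_name main (name_imports to_import extra_imports existing base_name main)

-- ===== LEMMAS AND PROOFS =====
-- a candidate name is blocked iff it is in `existing` or is a key of `assign`
def pvBlocked (existing : List String) (assign : PySem.Dict String String) (s : String) : Bool :=
  existing.contains s || assign.contains s

-- `Nat.toDigitsCore` written through `Nat.digits` (towards injectivity of "%d")
theorem pv_toDigitsCore_eq : ∀ (f : Nat), ∀ n l, 0 < n → n < f →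
    Nat.toDigitsCore 10 f n l = ((Nat.digits 10 n).map Nat.digitChar).reverse ++ l := by
  intro f
  induction f with
  | zero => intro n l h1 h2; omega
  | succ f ih =>
    intro n l h1 h2
    rw [Nat.toDigitsCore]
    by_cases hd : n / 10 = 0
    · simp only [hd, if_true]
      rw [Nat.digits_def' (by norm_num : 1 < 10) h1, hd]
      simp
    · simp only [hd, if_false]
      rw [ih (n / 10) _ (Nat.pos_of_ne_zero hd) (by omega)]
      rw [Nat.digits_def' (by norm_num : 1 < 10) h1]
      simp

theorem pv_digitChar_inj : ∀ a < 10, ∀ b < 10, Nat.digitChar a = Nat.digitChar b → a = b := by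
  decide

theorem pv_map_digitChar_inj : ∀ (l1 l2 : List Nat), (∀ x ∈ l1, x < 10) → (∀ x ∈ l2, x < 10) →
    l1.map Nat.digitChar = l2.map Nat.digitChar → l1 = l2 := by
  intro l1
  induction l1 with
  | nil => intro l2 _ _ h; cases l2 <;> simp_all
  | cons a t ih =>
    intro l2 h1 h2 h
    cases l2 with
    | nil => simp_all
    | cons b t2 =>
      simp only [List.map_cons, List.cons.injEq] at h
      have := pv_digitChar_inj a (h1 a (by simp)) b (h2 b (by simp)) h.1
      subst this
      rw [ih t2 (fun x hx => h1 x (by simp [hx])) (fun x hx => h2 x (by simp [hx])) h.2]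

theorem pv_toDigits_inj {m n : Nat} (hm : 0 < m) (hn : 0 < n)
    (h : Nat.toDigits 10 m = Nat.toDigits 10 n) : m = n := by
  unfold Nat.toDigits at h
  rw [pv_toDigitsCore_eq _ m [] hm (by omega), pv_toDigitsCore_eq _ n [] hn (by omega)] at h
  simp only [List.append_nil] at h
  have h2 := List.reverse_injective h
  have h3 := pv_map_digitChar_inj _ _ (fun x hx => Nat.digits_lt_base (by norm_num) hx)
    (fun x hx => Nat.digits_lt_base (by norm_num) hx) h2
  exact Nat.digits_inj_iff.mp h3

theorem pv_toStr_natCast (j : Nat) : (PySem.Int.toStr (j : Int)).toList = Nat.toDigits 10 j := by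
  simp [PySem.Int.toStr, PySem.Int.toChars]

theorem pv_toStr_inj {m n : Nat} (hm : 0 < m) (hn : 0 < n)
    (h : PySem.Int.toStr (m : Int) = PySem.Int.toStr (n : Int)) : m = n := by
  have h2 := congrArg String.toList h
  rw [pv_toStr_natCast, pv_toStr_natCast] at h2
  exact pv_toDigits_inj hm hn h2

-- distinct counts give distinct candidate strings
theorem pv_cand_inj {base : String} {j k : Nat} (hj : 0 < j) (hk : 0 < k)
    (h : pvA_cand base j = pvA_cand base k) : j = k := by
  have h2 := congrArg String.toList h
  simp only [pvA_cand, String.toList_append, pv_toStr_natCast] at h2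
  exact pv_toDigits_inj hj hk (List.append_cancel_left (List.append_cancel_right h2))

-- pigeonhole: among |existing| + |assign| + 1 consecutive candidates one is free
theorem pv_exists_free (existing : List String) (assign : PySem.Dict String String)
    (base : String) (count : Nat) (hc : 0 < count) :
    ∃ j, j < existing.length + assign.size + 1 ∧
      pvBlocked existing assign (pvA_cand base (count + j)) = false := by
  by_contra hcon
  push Not at hcon
  have hall : ∀ j < existing.length + assign.size + 1,
      pvBlocked existing assign (pvA_cand base (count + j)) = true := by
    intro j hj
    have := hcon j hj
    revert this
    cases pvBlocked existing assign (pvA_cand base (count + j)) <;> simp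
  set N := existing.length + assign.size + 1 with hN
  have hnd : ((List.range N).map (fun j => pvA_cand base (count + j))).Nodup :=
    (List.nodup_range).map_on (fun a _ b _ h => by
      have := pv_cand_inj (by omega) (by omega) h; omega)
  have hsub : ((List.range N).map (fun j => pvA_cand base (count + j))) ⊆
      existing ++ assign.keys := by
    intro x hx
    simp only [List.mem_map, List.mem_range] at hx
    obtain ⟨j, hj, rfl⟩ := hx
    have hb := hall j hj
    simp only [pvBlocked, Bool.or_eq_true] at hb
    rcases hb with hb | hb
    · exact List.mem_append_left _ (List.mem_of_elem_eq_true hb)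
    · exact List.mem_append_right _ ((PySem.Dict.contains_iff_mem_keys _ _).mp hb)
  have hlen := (List.subperm_of_subset hnd hsub).length_le
  simp only [List.length_map, List.length_range, List.length_append] at hlen
  have : assign.keys.length = assign.size := by simp [PySem.Dict.keys, PySem.Dict.size]
  omega

theorem pv_free_iff (existing : List String) (assign : PySem.Dict String String) (s : String) :
    (!(existing.contains s) && !(assign.contains s)) = !(pvBlocked existing assign s) := by
  simp [pvBlocked]

-- A's loop returns the candidate at the least free count ≥ its start
theorem pv_findLoop_eq (existing : List String) (assign : PySem.Dict String String)
    (base : String) : ∀ fuel count m, count ≤ m → m < count + fuel →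
    pvBlocked existing assign (pvA_cand base m) = false →
    (∀ k, count ≤ k → k < m → pvBlocked existing assign (pvA_cand base k) = true) →
    pvA_findLoop existing assign base count fuel = pvA_cand base m := by
  intro fuel
  induction fuel with
  | zero => intro count m h1 h2; omega
  | succ fuel ih =>
    intro count m h1 h2 hm hall
    rw [pvA_findLoop]
    simp only [pv_free_iff]
    by_cases hcm : count = m
    · subst hcm; simp [hm]
    · have hb := hall count (le_refl _) (by omega)
      simp only [hb, Bool.not_true]
      exact ih (count + 1) m (by omega) (by omega) hm (fun k hk1 hk2 => hall k (by omega) hk2)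

-- B's mex loop returns the least count ≥ its start whose suffix string is not in the table
theorem pv_mex_eq (mids : PySem.Set String) : ∀ (fuel count m : Nat), count ≤ m → m < count + fuel →
    PySem.Set.contains mids (PySem.Int.toStr (m : Int)) = false →
    (∀ k, count ≤ k → k < m → PySem.Set.contains mids (PySem.Int.toStr (k : Int)) = true) →
    pvB_mex mids count fuel = m := by
  intro fuel
  induction fuel with
  | zero => intro count m h1 h2; omega
  | succ fuel ih =>
    intro count m h1 h2 hm hall
    rw [pvB_mex]
    by_cases hcm : count = m
    · subst hcm; rw [hm]; simp
    · have hb := hall count (le_refl _) (by omega)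
      rw [hb]; simp only [if_true]
      exact ih (count + 1) m (by omega) (by omega) hm (fun k hk1 hk2 => hall k (by omega) hk2)

-- pigeonhole for B's fuel: some count in [1, |mids|+1] has its suffix outside the table
theorem pv_mex_exists (mids : PySem.Set String) :
    ∃ m, 1 ≤ m ∧ m ≤ mids.length + 1 ∧
      PySem.Set.contains mids (PySem.Int.toStr (m : Int)) = false := by
  by_contra hcon
  push Not at hcon
  have hall : ∀ m, 1 ≤ m → m ≤ mids.length + 1 →
      PySem.Int.toStr (m : Int) ∈ mids := by
    intro m h1 h2
    have := hcon m h1 h2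
    have hb : PySem.Set.contains mids (PySem.Int.toStr (m : Int)) = true := by
      revert this; cases PySem.Set.contains mids (PySem.Int.toStr (m : Int)) <;> simp
    simpa [PySem.Set.contains] using hb
  have hnd2 : ((List.range (mids.length + 1)).map
      (fun j => PySem.Int.toStr ((j + 1 : Nat) : Int))).Nodup :=
    (List.nodup_range).map_on (fun a _ b _ h => by
      have := pv_toStr_inj (by omega) (by omega) h; omega)
  have hsub : ((List.range (mids.length + 1)).map
      (fun j => PySem.Int.toStr ((j + 1 : Nat) : Int))) ⊆ mids := by
    intro x hx
    simp only [List.mem_map, List.mem_range] at hx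
    obtain ⟨j, hj, rfl⟩ := hx
    exact hall (j + 1) (by omega) (by omega)
  have hlen := (List.subperm_of_subset hnd2 hsub).length_le
  simp only [List.length_map, List.length_range] at hlen
  omega

-- s[a:-1] on List Char
theorem pv_slice_neg_one (xs : List Char) (a : Nat) :
    PySem.List.slice xs (some (a:Int)) (some (-1)) = (xs.drop a).dropLast := by
  simp only [PySem.List.slice, PySem.List.clampIdx_neg_one, PySem.List.clampIdx_natCast]
  by_cases h : a ≤ xs.length
  · rw [min_eq_left h, List.dropLast_eq_take, List.length_drop]
    congr 1; omega
  · have h' : xs.length ≤ a := by omega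
    rw [min_eq_right (by omega), List.drop_length, List.drop_eq_nil_of_le h']
    simp

-- an occurrence of " (" at position j
def pvDec (cs : List Char) (j : Nat) : Prop := [' ', '('] <+: cs.drop j

-- a decomposition of s at some occurrence of " (" with the given base and suffix exists
-- exactly when s is that base + " (" + suffix + ")"  (the reconstruction lemma)
theorem pv_dec_iff (s b m : String) (hend : PySem.Str.endswith s ")" = true) :
    (∃ j : Nat, pvDec s.toList j ∧ PySem.Str.slice s none (some (j : Int)) = b ∧
        PySem.Str.slice s (some ((j : Int) + 2)) (some (-1)) = m) ↔
    s = b ++ " (" ++ m ++ ")" := by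
  have hrp : (")" : String).toList = [')'] := rfl
  rw [PySem.Str.endswith_eq, PySem.Chars.endswith_iff, hrp] at hend
  constructor
  · rintro ⟨j, hdec, hb, hm⟩
    obtain ⟨rest, hrest⟩ := hdec
    have hbl : b.toList = s.toList.take j := by
      rw [← hb, PySem.Str.toList_slice, PySem.Chars.slice_eq_listSlice,
        PySem.List.slice_to_natCast]
    have hml : m.toList = (s.toList.drop (j + 2)).dropLast := by
      rw [← hm, PySem.Str.toList_slice, PySem.Chars.slice_eq_listSlice]
      have : ((j : Int) + 2) = ((j + 2 : Nat) : Int) := by push_cast; ring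
      rw [this, pv_slice_neg_one]
    have hdrop2 : s.toList.drop (j + 2) = rest := by
      have h1 : s.toList.drop (j + 2) = (s.toList.drop j).drop 2 := by
        rw [List.drop_drop]
      rw [h1, ← hrest]
      rfl
    have hrne : rest ≠ [] := by
      rintro rfl
      obtain ⟨u, hu⟩ := hend
      have h1 : s.toList = s.toList.take j ++ [' ', '('] := by
        conv_lhs => rw [← List.take_append_drop j s.toList]
        rw [← hrest]
        simp
      have := congrArg (fun l => l.getLast?) (hu.trans h1)
      simp at this
    have hlast : rest.getLast? = some ')' := by
      obtain ⟨u, hu⟩ := hend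
      have h1 : s.toList.getLast? = some ')' := by rw [← hu]; simp
      have h2 : s.toList = s.toList.take j ++ ([' ', '('] ++ rest) := by
        conv_lhs => rw [← List.take_append_drop j s.toList]
        rw [← hrest]
      rw [h2, List.getLast?_append_of_ne_nil _ (by simp),
        List.getLast?_append_of_ne_nil _ hrne] at h1
      exact h1
    have hrrepr : rest = rest.dropLast ++ [')'] := by
      conv_lhs => rw [← List.dropLast_append_getLast? _ hlast]
    have hrest2 : rest = m.toList ++ [')'] := by
      conv_lhs => rw [hrrepr]
      rw [hml, hdrop2]
    have hsp : (" (" : String).toList = [' ', '('] := rfl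
    apply String.toList_inj.mp
    conv_lhs => rw [← List.take_append_drop j s.toList]
    rw [← hrest, hrest2, ← hbl]
    simp [String.toList_append, hrp, hsp]
  · rintro rfl
    refine ⟨b.toList.length, ?_, ?_, ?_⟩
    · unfold pvDec
      have : (b ++ " (" ++ m ++ ")").toList =
          b.toList ++ ([' ', '('] ++ (m.toList ++ [')'])) := by
        simp [String.toList_append]
      rw [this, List.drop_left]
      exact ⟨m.toList ++ [')'], rfl⟩
    · apply String.toList_inj.mp
      rw [PySem.Str.toList_slice, PySem.Chars.slice_eq_listSlice, PySem.List.slice_to_natCast]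
      have : (b ++ " (" ++ m ++ ")").toList =
          b.toList ++ ([' ', '('] ++ (m.toList ++ [')'])) := by
        simp [String.toList_append]
      rw [this, List.take_left]
    · apply String.toList_inj.mp
      rw [PySem.Str.toList_slice, PySem.Chars.slice_eq_listSlice]
      have h2 : ((b.toList.length : Int) + 2) = ((b.toList.length + 2 : Nat) : Int) := by
        push_cast; ring
      rw [h2, pv_slice_neg_one]
      have : (b ++ " (" ++ m ++ ")").toList =
          (b.toList ++ [' ', '(']) ++ (m.toList ++ [')']) := by
        simp [String.toList_append]
      rw [this, List.drop_left' (by simp)]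
      simp

-- what the register loop adds: exactly the decompositions at occurrences ≥ its start
theorem pv_regLoop_mem (s : String) :
    ∀ (fuel start : Nat) (buckets : PySem.Dict String (PySem.Set String)),
    start ≤ s.toList.length → s.toList.length + 1 - start < fuel →
    ∀ (b m : String),
    (m ∈ (pvB_regLoop s (PySem.Str.findFrom s " (" (start : Int)) buckets
        fuel).getD b PySem.Set.empty ↔
      m ∈ buckets.getD b PySem.Set.empty ∨
        ∃ j, start ≤ j ∧ pvDec s.toList j ∧
          PySem.Str.slice s none (some (j : Int)) = b ∧
          PySem.Str.slice s (some ((j : Int) + 2)) (some (-1)) = m) := by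
  have hsb : (" (" : String).toList = [' ', '('] := rfl
  intro fuel
  induction fuel with
  | zero => intro start buckets h1 h2; omega
  | succ fuel ih =>
    intro start buckets hstart hfuel b m
    set r := PySem.Str.findFrom s " (" (start : Int) with hrdef
    have hrc : r = PySem.Chars.findFrom s.toList [' ', '('] (start : Int) := by
      rw [hrdef, PySem.Str.findFrom_eq, hsb]
    by_cases hr : r = -1
    · have hbeq : (r == -1) = true := by rw [hr]; rfl
      rw [pvB_regLoop]
      rw [hbeq]
      simp only [if_true]
      have hnoinf : ¬ [' ', '('] <:+: s.toList.drop start := by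
        rw [← PySem.Chars.findFrom_natCast_eq_neg_one_iff s.toList [' ', '('] start hstart]
        rw [← hrc]
        exact hr
      constructor
      · exact fun h => Or.inl h
      · rintro (h | ⟨j, hj, hdec, _⟩)
        · exact h
        · exfalso
          apply hnoinf
          have hjd : s.toList.drop j = (s.toList.drop start).drop (j - start) := by
            rw [List.drop_drop]
            congr 1
            omega
          rw [pvDec, hjd] at hdec
          exact hdec.isInfix.trans (List.drop_suffix _ _).isInfix
    · have hbeq : (r == -1) = false := by simpa using hr
      have hrc' : PySem.Chars.findFrom s.toList [' ', '('] (start : Int) ≠ -1 := by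
        rw [← hrc]; exact hr
      obtain ⟨hge, hpre, hmin⟩ :=
        PySem.Chars.findFrom_natCast_spec s.toList [' ', '('] start hstart hrc'
      rw [← hrc] at hge hpre hmin
      have hr0 : 0 ≤ r := le_trans (by positivity) hge
      set j0 := r.toNat with hj0
      have hrj : r = (j0 : Int) := (Int.toNat_of_nonneg hr0).symm
      have hstartj0 : start ≤ j0 := by omega
      have hj0len : j0 + 2 ≤ s.toList.length := by
        have h1 := hpre.length_le
        simp only [List.length_drop, List.length_cons, List.length_nil] at h1
        omega
      rw [pvB_regLoop]
      rw [hbeq]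
      simp only [Bool.false_eq_true, if_false]
      have hcall : r + 1 = (((j0 + 1 : Nat)) : Int) := by rw [hrj]; push_cast; ring
      rw [hcall,
        ih (j0 + 1) _ (by omega) (by omega) b m]
      rw [PySem.Dict.getD_insert]
      -- names for the decomposition recorded at j0
      have hjr : ((j0 : Int)) = r := hrj.symm
      by_cases hb : b = PySem.Str.slice s none (some r)
      · subst hb
        rw [if_pos rfl]
        rw [PySem.Set.mem_add]
        constructor
        · rintro ((h | h) | ⟨j, hj, hrest⟩)
          · exact Or.inl h
          · refine Or.inr ⟨j0, hstartj0, hpre, ?_, ?_⟩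
            · rw [hjr]
            · rw [hjr, h]
          · exact Or.inr ⟨j, by omega, hrest⟩
        · rintro (h | ⟨j, hj, hdec, hsb', hsm⟩)
          · exact Or.inl (Or.inl h)
          · rcases Nat.lt_trichotomy j j0 with hlt | hEq | hgt
            · exact absurd hdec (hmin j hj hlt)
            · subst hEq
              refine Or.inl (Or.inr ?_)
              rw [← hsm, hjr]
            · exact Or.inr ⟨j, by omega, hdec, hsb', hsm⟩
      · rw [if_neg hb]
        constructor
        · rintro (h | ⟨j, hj, hrest⟩)
          · exact Or.inl h
          · exact Or.inr ⟨j, by omega, hrest⟩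
        · rintro (h | ⟨j, hj, hdec, hsb', hsm⟩)
          · exact Or.inl h
          · rcases Nat.lt_trichotomy j j0 with hlt | hEq | hgt
            · exact absurd hdec (hmin j hj hlt)
            · subst hEq
              exact absurd (by rw [← hsb', hjr]) hb
            · exact Or.inr ⟨j, by omega, hdec, hsb', hsm⟩

-- register keeps the bucket index exact: a suffix is in a base's bucket iff the composed
-- name is blocked
theorem pv_register_mem (s : String) (blocked : PySem.Set String)
    (buckets : PySem.Dict String (PySem.Set String))
    (hK : ∀ b m, m ∈ buckets.getD b PySem.Set.empty ↔ (b ++ " (" ++ m ++ ")") ∈ blocked) :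
    ∀ b m, m ∈ (pvB_register s blocked buckets).2.getD b PySem.Set.empty ↔
      (b ++ " (" ++ m ++ ")") ∈ (pvB_register s blocked buckets).1 := by
  intro b m
  unfold pvB_register
  rw [PySem.Set.mem_add]
  by_cases hend : PySem.Str.endswith s ")" = true
  · simp only [hend, if_true]
    have hfind : PySem.Str.find s " (" = PySem.Str.findFrom s " (" ((0 : Nat) : Int) := by
      simp
    rw [hfind, pv_regLoop_mem s (s.toList.length + 2) 0 buckets (by omega) (by omega) b m,
      hK]
    have hdec := pv_dec_iff s b m hend
    constructor
    · rintro (h | ⟨j, _, hj⟩)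
      · exact Or.inl h
      · exact Or.inr (hdec.mp ⟨j, hj⟩).symm
    · rintro (h | h)
      · exact Or.inl h
      · obtain ⟨j, hj⟩ := hdec.mpr h.symm
        exact Or.inr ⟨j, Nat.zero_le j, hj⟩
  · simp only [hend, Bool.false_eq_true, if_false]
    rw [hK]
    constructor
    · exact fun h => Or.inl h
    · rintro (h | h)
      · exact h
      · exfalso
        apply hend
        rw [← h, PySem.Str.endswith_eq, PySem.Chars.endswith_iff]
        exact ⟨(b ++ " (" ++ m).toList, by simp [String.toList_append]⟩

-- registering a whole list from a consistent state
theorem pv_regList (L : List String) :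
    ∀ (bl : PySem.Set String) (bk : PySem.Dict String (PySem.Set String)),
    (∀ b m, m ∈ bk.getD b PySem.Set.empty ↔ (b ++ " (" ++ m ++ ")") ∈ bl) →
    (∀ b m, m ∈ (L.foldl (fun bb s => pvB_register s bb.1 bb.2) (bl, bk)).2.getD b
        PySem.Set.empty ↔
        (b ++ " (" ++ m ++ ")") ∈ (L.foldl (fun bb s => pvB_register s bb.1 bb.2) (bl, bk)).1) ∧
    (∀ x, x ∈ (L.foldl (fun bb s => pvB_register s bb.1 bb.2) (bl, bk)).1 ↔ x ∈ bl ∨ x ∈ L) := by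
  induction L with
  | nil => intro bl bk hK; exact ⟨hK, fun x => by simp⟩
  | cons s t ih =>
    intro bl bk hK
    rw [List.foldl_cons]
    have hstep := pv_register_mem s bl bk hK
    obtain ⟨h1, h2⟩ := ih (pvB_register s bl bk).1 (pvB_register s bl bk).2 hstep
    refine ⟨h1, fun x => ?_⟩
    rw [h2 x]
    show x ∈ PySem.Set.add bl s ∨ x ∈ t ↔ x ∈ bl ∨ x ∈ s :: t
    rw [PySem.Set.mem_add, List.mem_cons]
    tauto

-- the invariants carried through B's loop
def pvBInv (existing : List String) (assign : PySem.Dict String String)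
    (blocked : PySem.Set String) : Prop :=
  ∀ x, PySem.Set.contains blocked x = pvBlocked existing assign x

def pvKInv (blocked : PySem.Set String)
    (buckets : PySem.Dict String (PySem.Set String)) : Prop :=
  ∀ b m, m ∈ buckets.getD b PySem.Set.empty ↔ (b ++ " (" ++ m ++ ")") ∈ blocked

-- one step: B computes A's find_name and re-establishes the invariants
theorem pv_step (existing : List String) (base_name repo : String)
    (assign : PySem.Dict String String) (blocked : PySem.Set String)
    (buckets : PySem.Dict String (PySem.Set String))
    (hB : pvBInv existing assign blocked) (hK : pvKInv blocked buckets) :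
    (pvB_step base_name (assign, blocked, buckets) repo).1 =
      assign.insert repo (pvA_findName existing assign base_name repo) ∧
    pvBInv existing (assign.insert repo (pvA_findName existing assign base_name repo))
      (pvB_step base_name (assign, blocked, buckets) repo).2.1 ∧
    pvKInv (pvB_step base_name (assign, blocked, buckets) repo).2.1
      (pvB_step base_name (assign, blocked, buckets) repo).2.2 := by
  set base := base_name ++ "/" ++ repo with hbase
  set taken := buckets.getD base PySem.Set.empty with htaken
  have hmem : ∀ k : Nat, PySem.Set.contains taken (PySem.Int.toStr (k : Int)) =
      pvBlocked existing assign (pvA_cand base k) := by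
    intro k
    rw [Bool.eq_iff_iff, PySem.Set.contains_iff, htaken, hK, ← hB (pvA_cand base k),
      PySem.Set.contains_iff]
    exact Iff.rfl
  set nameB := (if !(PySem.Set.contains blocked base) then base
    else base ++ " (" ++
      PySem.Int.toStr ((pvB_mex taken 1 (taken.length + 1) : Nat) : Int) ++ ")") with hnameB
  have hstep : pvB_step base_name (assign, blocked, buckets) repo =
      (assign.insert repo nameB, (pvB_register repo blocked buckets).1,
       (pvB_register repo blocked buckets).2) := rfl
  have hname : nameB = pvA_findName existing assign base_name repo := by
    rw [hnameB]
    unfold pvA_findName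
    dsimp only
    rw [← hbase, pv_free_iff, hB base]
    by_cases hfree : pvBlocked existing assign base = true
    · rw [hfree]
      simp only [Bool.not_true, Bool.false_eq_true, if_false]
      have hex : ∃ j, pvBlocked existing assign (pvA_cand base (1 + j)) = false := by
        obtain ⟨j, _, hj⟩ := pv_exists_free existing assign base 1 (by omega)
        exact ⟨j, hj⟩
      set jm := Nat.find hex with hjm
      set m := 1 + jm with hm
      have hmfree : pvBlocked existing assign (pvA_cand base m) = false := Nat.find_spec hex
      have hallm : ∀ k, 1 ≤ k → k < m → pvBlocked existing assign (pvA_cand base k) = true := by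
        intro k hk1 hk2
        have heq : k = 1 + (k - 1) := by omega
        rw [heq]
        have hlt : k - 1 < jm := by omega
        have := Nat.find_min hex hlt
        revert this
        cases pvBlocked existing assign (pvA_cand base (1 + (k - 1))) <;> simp
      have hmex : pvB_mex taken 1 (taken.length + 1) = m := by
        apply pv_mex_eq taken (taken.length + 1) 1 m (by omega) ?_ ?_ ?_
        · obtain ⟨m', h1, h2, h3⟩ := pv_mex_exists taken
          rw [hmem m'] at h3
          have : m ≤ m' := by
            by_contra hcon
            have := hallm m' h1 (by omega)
            rw [this] at h3; cases h3
          omega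
        · rw [hmem m]; exact hmfree
        · intro k hk1 hk2
          rw [hmem k]
          exact hallm k hk1 hk2
      rw [hmex]
      have hloop : pvA_findLoop existing assign base 1
          (existing.length + assign.size + 1) = pvA_cand base m := by
        apply pv_findLoop_eq existing assign base _ 1 m (by omega) ?_ hmfree hallm
        obtain ⟨j, hjN, hj⟩ := pv_exists_free existing assign base 1 (by omega)
        have : jm ≤ j := Nat.find_min' hex hj
        omega
      rw [hloop]
      rfl
    · have hf : pvBlocked existing assign base = false := by
        revert hfree; cases pvBlocked existing assign base <;> simp
      rw [hf]
      simp
  refine ⟨by rw [hstep, hname], ?_, ?_⟩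
  · rw [hstep]
    intro x
    show PySem.Set.contains (PySem.Set.add blocked repo) x = _
    rw [Bool.eq_iff_iff, PySem.Set.contains_iff, PySem.Set.mem_add, ← PySem.Set.contains_iff,
      hB x]
    simp only [pvBlocked, PySem.Dict.contains_insert, Bool.or_eq_true, beq_iff_eq]
    tauto
  · rw [hstep]
    exact pv_register_mem repo blocked buckets hK

-- the two loops agree stepwise
theorem pv_loop_eq (existing : List String) (base_name : String) :
    ∀ (repos : List String) (assign : PySem.Dict String String) (blocked : PySem.Set String)
      (buckets : PySem.Dict String (PySem.Set String)),
    pvBInv existing assign blocked → pvKInv blocked buckets →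
    (repos.foldl (pvB_step base_name) (assign, blocked, buckets)).1 =
      pvA_loop existing base_name repos assign := by
  intro repos
  induction repos with
  | nil => intro assign blocked buckets _ _; rfl
  | cons r rs ih =>
    intro assign blocked buckets hB hK
    obtain ⟨hstep, hB', hK'⟩ := pv_step existing base_name r assign blocked buckets hB hK
    rw [List.foldl_cons, pvA_loop, List.foldl_cons, ← hstep]
    have hsplit : pvB_step base_name (assign, blocked, buckets) r =
        ((pvB_step base_name (assign, blocked, buckets) r).1,
         (pvB_step base_name (assign, blocked, buckets) r).2.1,
         (pvB_step base_name (assign, blocked, buckets) r).2.2) := rfl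
    rw [hsplit, hstep, ← hstep]
    exact ih _ _ _ (hstep ▸ hB') hK'

-- ===== VERDICT (by name: the statement is the Claim_ definition above) =====
theorem name_imports_spec : Claim_equal_name_imports := by
  intro to_import extra_imports existing base_name main _
  unfold Spec_name_imports name_imports name_imports_alt pvA_init pvB_init
  set st0 := existing.foldl (fun bb s => pvB_register s bb.1 bb.2)
    (PySem.Set.empty, PySem.Dict.empty) with hst0
  have hK00 : ∀ b m, m ∈ (PySem.Dict.empty :
      PySem.Dict String (PySem.Set String)).getD b PySem.Set.empty ↔
      (b ++ " (" ++ m ++ ")") ∈ (PySem.Set.empty : PySem.Set String) := by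
    intro b m
    rw [PySem.Dict.getD_eq_get?_getD, PySem.Dict.get?_empty]
    simp [PySem.Set.empty]
  obtain ⟨hK0, hM0⟩ := pv_regList existing PySem.Set.empty PySem.Dict.empty hK00
  rw [← hst0] at hK0 hM0
  have hgo : ∀ (repos : List String) (assign : PySem.Dict String String)
      (blocked : PySem.Set String) (buckets : PySem.Dict String (PySem.Set String)),
      pvBInv existing assign blocked → pvKInv blocked buckets →
      (pvA_loop existing base_name repos assign).items =
        ((repos.foldl (pvB_step base_name) (assign, blocked, buckets)).1).items := by
    intro repos assign blocked buckets hB hK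
    rw [pv_loop_eq existing base_name repos assign blocked buckets hB hK]
  have hB0 : pvBInv existing PySem.Dict.empty st0.1 := by
    intro x
    rw [Bool.eq_iff_iff, PySem.Set.contains_iff, hM0 x]
    simp only [pvBlocked, PySem.Dict.contains_empty, Bool.or_false, PySem.Set.empty]
    rw [List.contains_iff_mem]
    simp
  cases main with
  | none => exact hgo (to_import ++ extra_imports) PySem.Dict.empty st0.1 st0.2 hB0 hK0
  | some m =>
    by_cases h : existing.contains base_name
    · rw [h]
      simp only [Bool.not_true, Bool.false_eq_true, if_false]
      exact hgo (to_import ++ extra_imports) PySem.Dict.empty st0.1 st0.2 hB0 hK0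
    · have hf : existing.contains base_name = false := by
        revert h; cases existing.contains base_name <;> simp
      rw [hf]
      simp only [Bool.not_false, if_true]
      apply hgo
      · intro x
        show PySem.Set.contains (PySem.Set.add st0.1 m) x = _
        rw [Bool.eq_iff_iff, PySem.Set.contains_iff, PySem.Set.mem_add, hM0 x]
        simp only [pvBlocked, PySem.Dict.contains_insert, PySem.Dict.contains_empty,
          Bool.or_eq_true, beq_iff_eq, PySem.Set.empty]
        rw [List.contains_iff_mem]
        simp
      · exact pv_register_mem m st0.1 st0.2 hK0
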